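-- pv_equiv track=rewrite | github.com/pypi-data/pypi-mirror-80 | packages/pyGSTi/pyGSTi-0.9.9.3.tar.gz/pyGSTi-0.9.9.3/pygsti/report/factory.py | _add_new_estimate_labels
-- ===== SOURCE A (Python) =====
-- ROBUST_SUFFIX_LIST = [".robust", ".Robust", ".robust+", ".Robust+"]  # ".wildcard" (not a separate estimate anymore)
--
-- def _add_new_estimate_labels(running_lbls, estimates, combine_robust):
--     """
--     Like _add_new_labels but perform robust-suffix processing.
--
--     In particular, if `combine_robust == True` then do not add
--     labels which have a ".robust" counterpart.
--     """
--     current_lbls = list(estimates.keys())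
--
--     def _add_lbl(lst, lbl):
--         if combine_robust and any([(lbl + suffix in current_lbls)
--                                    for suffix in ROBUST_SUFFIX_LIST]):
--             return  # don't add label
--         lst.append(lbl)  # add label
--
--     if running_lbls is None:
--         running_lbls = []
--
--     if running_lbls != current_lbls:
--         for lbl in current_lbls:
--             if lbl not in running_lbls:
--                 _add_lbl(running_lbls, lbl)
--
--     return running_lbls
-- ===== SOURCE B (Python) =====
-- ROBUST_SUFFIX_LIST = [".robust", ".Robust", ".robust+", ".Robust+"]
--
--
-- def _add_new_estimate_labels(running_lbls, estimates, combine_robust):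
--     """Same merge, but with a prebuilt inverted index: one pass over the
--     current labels records every base label shadowed by a robust-suffixed
--     counterpart, so the per-candidate four-concatenation membership scan
--     disappears, and membership in the growing running_lbls is
--     tracked by a set as well.  Mutates running_lbls in place, like the original."""
--     current_lbls = list(estimates.keys())
--
--     excluded = set()
--     if combine_robust:
--         for lbl in current_lbls:
--             for suffix in ROBUST_SUFFIX_LIST:
--                 if lbl.endswith(suffix):
--                     excluded.add(lbl[:-len(suffix)])
--
--     if running_lbls is None:
--         running_lbls = []
--
--     if running_lbls != current_lbls:
--         seen = set(running_lbls)
--         for lbl in current_lbls: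
--             if lbl not in seen and lbl not in excluded:
--                 running_lbls.append(lbl)
--                 seen.add(lbl)
--
--     return running_lbls
-- ===== Notes on version B (the rewrite author's own statement) =====
-- stated objective: faster
-- what changed: Replaces the per-candidate scan that tests four concatenations lbl+suffix against the whole label list with a set of shadowed base labels built once up front (lbl[:-len(suffix)] for every suffixed label), so each candidate is decided by one set-membership test.
import Mathlib
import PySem

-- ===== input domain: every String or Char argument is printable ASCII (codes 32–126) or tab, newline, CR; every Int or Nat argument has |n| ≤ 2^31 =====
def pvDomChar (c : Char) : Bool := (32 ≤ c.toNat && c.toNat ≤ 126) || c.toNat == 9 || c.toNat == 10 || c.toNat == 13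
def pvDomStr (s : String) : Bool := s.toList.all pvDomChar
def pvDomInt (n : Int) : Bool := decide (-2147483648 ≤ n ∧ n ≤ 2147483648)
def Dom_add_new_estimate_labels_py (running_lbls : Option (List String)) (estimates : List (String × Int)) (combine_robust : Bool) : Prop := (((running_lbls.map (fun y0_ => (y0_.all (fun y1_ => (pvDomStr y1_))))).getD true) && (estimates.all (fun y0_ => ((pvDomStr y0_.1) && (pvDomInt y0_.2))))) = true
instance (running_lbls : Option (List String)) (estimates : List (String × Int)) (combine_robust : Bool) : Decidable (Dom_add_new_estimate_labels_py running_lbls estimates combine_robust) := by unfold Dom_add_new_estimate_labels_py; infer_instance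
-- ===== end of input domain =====

-- B replaces A's per-candidate scan (four concatenations tested against the whole label
-- list) with a set of shadowed base labels built once up front, and tracks membership in
-- the growing running_lbls with a set; equivalence is about the RETURN value only (both
-- Pythons append to the passed running_lbls in place).

def ROBUST_SUFFIX_LIST : List String := [".robust", ".Robust", ".robust+", ".Robust+"]

-- ===== PORT A =====
def add_new_estimate_labels_py (running_lbls : Option (List String)) (estimates : List (String × Int)) (combine_robust : Bool) : List String :=
  let current_lbls := (PySem.Dict.ofList estimates).keys
  -- def _add_lbl(lst, lbl): skip when combine_robust and any(lbl + suffix in current_lbls)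
  let addLbl : List String → String → List String := fun lst lbl =>
    if combine_robust && (ROBUST_SUFFIX_LIST.map (fun suffix => decide ((lbl ++ suffix) ∈ current_lbls))).any id then
      lst
    else
      lst ++ [lbl]
  let running := running_lbls.getD []   -- if running_lbls is None: running_lbls = []
  if running ≠ current_lbls then
    current_lbls.foldl (fun acc lbl => if lbl ∈ acc then acc else addLbl acc lbl) running
  else
    running

-- ===== PORT B =====
def add_new_estimate_labels_py_alt (running_lbls : Option (List String)) (estimates : List (String × Int)) (combine_robust : Bool) : List String :=
  let current_lbls := (PySem.Dict.ofList estimates).keys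
  -- excluded = { lbl[:-len(suffix)] for lbl in current_lbls for suffix … if lbl.endswith(suffix) }
  let excluded : PySem.Set String :=
    if combine_robust then
      current_lbls.foldl (fun ex lbl =>
        ROBUST_SUFFIX_LIST.foldl (fun ex suffix =>
          if PySem.Str.endswith lbl suffix then
            PySem.Set.add ex (PySem.Str.slice lbl none (some (-(PySem.Str.len suffix))))
          else ex) ex)
        PySem.Set.empty
    else PySem.Set.empty
  let running := running_lbls.getD []
  if running ≠ current_lbls then
    (current_lbls.foldl (fun st lbl =>
        if ¬ (PySem.Set.contains st.2 lbl) ∧ ¬ (PySem.Set.contains excluded lbl) then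
          (st.1 ++ [lbl], PySem.Set.add st.2 lbl)
        else st)
      (running, PySem.Set.ofList running)).1
  else
    running

-- ===== PRECONDITION & SPEC =====
def Spec_add_new_estimate_labels_py (running_lbls : Option (List String)) (estimates : List (String × Int)) (combine_robust : Bool) (out : List String) : Prop := out = add_new_estimate_labels_py_alt running_lbls estimates combine_robust
instance (running_lbls : Option (List String)) (estimates : List (String × Int)) (combine_robust : Bool) (out : List String) : Decidable (Spec_add_new_estimate_labels_py running_lbls estimates combine_robust out) := by unfold Spec_add_new_estimate_labels_py; infer_instance

-- ===== CLAIM (what is proved, stated in full; the proofs are below) =====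
def Claim_equal_add_new_estimate_labels_py : Prop := ∀ (running_lbls : Option (List String)) (estimates : List (String × Int)) (combine_robust : Bool), Dom_add_new_estimate_labels_py running_lbls estimates combine_robust → Spec_add_new_estimate_labels_py running_lbls estimates combine_robust (add_new_estimate_labels_py running_lbls estimates combine_robust)

-- ===== LEMMAS AND PROOFS =====

-- truncation used by B: lbl[:-len(suffix)]
def pvTrunc (l s : String) : String := PySem.Str.slice l none (some (-(PySem.Str.len s)))

-- For a nonempty suffix s: (l ends with s and dropping it gives x) ↔ l = x ++ s.
theorem pvTrunc_iff (l s x : String) (hs : s.toList ≠ []) :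
    (PySem.Str.endswith l s = true ∧ pvTrunc l s = x) ↔ l = x ++ s := by
  constructor
  · rintro ⟨he, ht⟩
    rw [PySem.Str.endswith_eq, PySem.Chars.endswith_iff] at he
    obtain ⟨t, ht'⟩ := he
    apply String.toList_inj.mp
    have hx : x.toList = t := by
      rw [← ht]
      unfold pvTrunc
      rw [PySem.Str.toList_slice, PySem.Chars.slice_eq_listSlice, PySem.Str.len]
      have hk : 0 < s.toList.length := List.length_pos_iff.mpr hs
      rw [PySem.List.slice_to_neg_natCast _ _ hk, ← ht']
      simp
    simp [← ht', hx]
  · rintro rfl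
    have hl : (x ++ s).toList = x.toList ++ s.toList := by simp
    constructor
    · rw [PySem.Str.endswith_eq, PySem.Chars.endswith_iff, hl]
      exact ⟨x.toList, rfl⟩
    · apply String.toList_inj.mp
      unfold pvTrunc
      rw [PySem.Str.toList_slice, PySem.Chars.slice_eq_listSlice, PySem.Str.len]
      have hk : 0 < s.toList.length := List.length_pos_iff.mpr hs
      rw [PySem.List.slice_to_neg_natCast _ _ hk, hl]
      simp

def pvInner (ex : PySem.Set String) (l : String) : PySem.Set String :=
  ROBUST_SUFFIX_LIST.foldl (fun ex suffix =>
    if PySem.Str.endswith l suffix then PySem.Set.add ex (pvTrunc l suffix) else ex) ex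

theorem pvMem_inner (ex : PySem.Set String) (l x : String) :
    x ∈ pvInner ex l ↔ x ∈ ex ∨ ∃ s ∈ ROBUST_SUFFIX_LIST, PySem.Str.endswith l s = true ∧ pvTrunc l s = x := by
  unfold pvInner
  generalize ROBUST_SUFFIX_LIST = sl
  induction sl generalizing ex with
  | nil => simp
  | cons s sl ih =>
    simp only [List.foldl_cons, ih, List.mem_cons]
    split
    · next h =>
      rw [PySem.Set.mem_add]
      constructor
      · rintro (⟨h1 | h1⟩ | ⟨s', hs', h2⟩)
        · exact Or.inl h1
        · exact Or.inr ⟨s, Or.inl rfl, h, h1.symm⟩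
        · exact Or.inr ⟨s', Or.inr hs', h2⟩
      · rintro (h1 | ⟨s', (rfl | hs'), h2, h3⟩)
        · exact Or.inl (Or.inl h1)
        · exact Or.inl (Or.inr h3.symm)
        · exact Or.inr ⟨s', hs', h2, h3⟩
    · next h =>
      constructor
      · rintro (h1 | ⟨s', hs', h2⟩)
        · exact Or.inl h1
        · exact Or.inr ⟨s', Or.inr hs', h2⟩
      · rintro (h1 | ⟨s', (rfl | hs'), h2, h3⟩)
        · exact Or.inl h1
        · exact absurd h2 h
        · exact Or.inr ⟨s', hs', h2, h3⟩

theorem pvMem_outer (cur : List String) (ex : PySem.Set String) (x : String) :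
    x ∈ cur.foldl pvInner ex ↔
      x ∈ ex ∨ ∃ l ∈ cur, ∃ s ∈ ROBUST_SUFFIX_LIST, PySem.Str.endswith l s = true ∧ pvTrunc l s = x := by
  induction cur generalizing ex with
  | nil => simp
  | cons l cur ih =>
    simp only [List.foldl_cons, ih, pvMem_inner, List.mem_cons]
    constructor
    · rintro ((h | h) | ⟨l', hl', h⟩)
      · exact Or.inl h
      · exact Or.inr ⟨l, Or.inl rfl, h⟩
      · exact Or.inr ⟨l', Or.inr hl', h⟩
    · rintro (h | ⟨l', (rfl | hl'), h⟩)
      · exact Or.inl (Or.inl h)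
      · exact Or.inl (Or.inr h)
      · exact Or.inr ⟨l', hl', h⟩

-- the two skip tests agree: x is in B's excluded set iff some x ++ suffix is a current label
theorem pvSkip_eq (cur : List String) (x : String) :
    (PySem.Set.contains (cur.foldl pvInner PySem.Set.empty) x) =
      (ROBUST_SUFFIX_LIST.map (fun suffix => decide ((x ++ suffix) ∈ cur))).any id := by
  rw [Bool.eq_iff_iff, PySem.Set.contains_iff, pvMem_outer]
  constructor
  · rintro (h1 | ⟨l, hl, s, hs, h2⟩)
    · simp [PySem.Set.empty] at h1
    · have := (pvTrunc_iff l s x (by fin_cases hs <;> decide)).mp h2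
      subst this
      simp only [List.any_eq_true, List.mem_map, id]
      exact ⟨_, ⟨s, hs, rfl⟩, by simpa using hl⟩
  · intro h
    simp only [List.any_eq_true, List.mem_map, id] at h
    obtain ⟨b, ⟨s, hs, rfl⟩, hb⟩ := h
    rw [decide_eq_true_iff] at hb
    exact Or.inr ⟨x ++ s, hb, s, hs, (pvTrunc_iff (x ++ s) s x (by fin_cases hs <;> decide)).mpr rfl⟩

theorem pvFoldl_ext {α β : Type} (f g : β → α → β) (h : ∀ b a, f b a = g b a) (init : β) (l : List α) :
    l.foldl f init = l.foldl g init := by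
  induction l generalizing init with
  | nil => rfl
  | cons a l ih => simp only [List.foldl_cons, h, ih]

-- B's loop with its `seen` set produces the same list as the plain membership loop.
theorem pvFold_pair (cur : List String) (skip : String → Bool) (acc : List String)
    (seen : PySem.Set String) (hinv : ∀ x, x ∈ seen ↔ x ∈ acc) :
    (cur.foldl (fun st lbl =>
        if ¬ (PySem.Set.contains st.2 lbl) ∧ ¬ (skip lbl) then
          (st.1 ++ [lbl], PySem.Set.add st.2 lbl)
        else st) (acc, seen)).1
      = cur.foldl (fun a lbl => if a.contains lbl then a else if skip lbl then a else a ++ [lbl]) acc := by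
  induction cur generalizing acc seen with
  | nil => rfl
  | cons lbl cur ih =>
    simp only [List.foldl_cons]
    have hc : PySem.Set.contains seen lbl = acc.contains lbl := by
      rw [Bool.eq_iff_iff, PySem.Set.contains_iff, List.contains_iff_mem]
      exact hinv lbl
    by_cases hm : acc.contains lbl = true
    · simp only [hc, hm, not_true, false_and, if_false, if_true]
      exact ih acc seen hinv
    · rw [Bool.not_eq_true] at hm
      by_cases hs : skip lbl = true
      · simp only [hc, hm, hs, Bool.false_eq_true, not_false_iff, not_true, true_and, if_false, if_true]
        exact ih acc seen hinv
      · rw [Bool.not_eq_true] at hs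
        simp only [hc, hm, hs, Bool.false_eq_true, not_false_iff, and_self, if_true, if_false]
        apply ih
        intro x
        rw [PySem.Set.mem_add, hinv x, List.mem_append, List.mem_singleton]

-- ===== VERDICT (by name: the statement is the Claim_ definition above) =====
theorem add_new_estimate_labels_py_spec : Claim_equal_add_new_estimate_labels_py := by
  intro running_lbls estimates combine_robust _
  unfold Spec_add_new_estimate_labels_py add_new_estimate_labels_py add_new_estimate_labels_py_alt
  simp only []
  set cur := (PySem.Dict.ofList estimates).keys with hcur
  set running := running_lbls.getD [] with hrun
  have hinv : ∀ x, x ∈ PySem.Set.ofList running ↔ x ∈ running := fun x => PySem.Set.mem_ofList running x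
  cases combine_robust with
  | false =>
    simp only [Bool.false_and]
    congr 1
    simp only [Bool.false_eq_true, if_false]
    rw [pvFold_pair cur (fun lbl => PySem.Set.contains PySem.Set.empty lbl) running _ hinv]
    apply pvFoldl_ext
    intro acc lbl
    by_cases hm : lbl ∈ acc <;>
      simp [hm, PySem.Set.empty, PySem.Set.contains]
  | true =>
    simp only [Bool.true_and]
    congr 1
    have hfold : cur.foldl (fun ex lbl =>
        ROBUST_SUFFIX_LIST.foldl (fun ex suffix =>
          if PySem.Str.endswith lbl suffix then
            PySem.Set.add ex (PySem.Str.slice lbl none (some (-(PySem.Str.len suffix))))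
          else ex) ex) PySem.Set.empty = cur.foldl pvInner PySem.Set.empty := rfl
    simp only [reduceIte]
    rw [hfold,
      pvFold_pair cur (fun lbl => PySem.Set.contains (cur.foldl pvInner PySem.Set.empty) lbl) running _ hinv]
    apply pvFoldl_ext
    intro acc lbl
    rw [pvSkip_eq cur lbl]
    by_cases hm : lbl ∈ acc
    · simp [hm]
    · by_cases ha : ((ROBUST_SUFFIX_LIST.map (fun suffix => decide ((lbl ++ suffix) ∈ cur))).any id) = true
      · simp [hm, ha]
      · simp [hm, ha]
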